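-- pv_equiv track=rewrite | github.com/damc/Algorithmic-problems-solutions | encryption.py | solution
-- ===== SOURCE A (Python) =====
-- def solution(x):
--     result = ''
--     for c in x:
--         if ord('a') <= ord(c) <= ord('z'):
--             encrypted_ascii = ord('z') - (ord(c) - ord('a'))
--             result += chr(encrypted_ascii)
--         else:
--             result += c
--     return result
-- ===== SOURCE B (Python) =====
-- def solution(x):
--     # Divide and conquer: split the string in half, encrypt each half
--     # recursively, and concatenate; a single character is mirrored
--     # arithmetically if lowercase, otherwise returned unchanged.
--     n = len(x)
--     if n == 0:
--         return ''
--     if n == 1: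
--         return chr(219 - ord(x)) if 'a' <= x <= 'z' else x
--     m = n // 2
--     return solution(x[:m]) + solution(x[m:])
-- ===== Notes on version B (the rewrite author's own statement) =====
-- stated objective: alternative
-- what changed: Replaces A's left-to-right per-character accumulation loop with a divide-and-conquer recursion that splits the string in half, encrypts each half recursively, and concatenates, with a single mirrored character as the base case.
import Mathlib
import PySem

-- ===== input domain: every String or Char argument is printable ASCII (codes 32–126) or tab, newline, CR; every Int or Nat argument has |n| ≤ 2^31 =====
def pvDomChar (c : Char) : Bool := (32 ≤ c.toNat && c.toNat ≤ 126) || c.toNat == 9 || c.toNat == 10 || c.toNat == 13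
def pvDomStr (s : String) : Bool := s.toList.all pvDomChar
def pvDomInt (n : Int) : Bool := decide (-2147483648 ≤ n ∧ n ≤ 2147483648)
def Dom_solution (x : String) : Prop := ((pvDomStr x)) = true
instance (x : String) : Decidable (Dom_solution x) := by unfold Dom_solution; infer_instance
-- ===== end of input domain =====

-- B replaces A's left-to-right accumulation loop with a divide-and-conquer recursion
-- (split in half, encrypt each half, concatenate); return values proved equal.

-- ===== PORT A =====
-- A: accumulate result char by char, mapping lowercase letters, copying everything else.
def solution (x : String) : String :=
  String.mk <| x.toList.foldl (fun result c =>
    if 97 ≤ c.toNat ∧ c.toNat ≤ 122 then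
      result ++ [Char.ofNat (122 - (c.toNat - 97))]
    else
      result ++ [c]) []

-- ===== PORT B =====
-- B: divide and conquer on the character list; x[:m] / x[m:] with 0 ≤ m ≤ len(x)
-- are exactly take / drop.
def solutionAltAux (l : List Char) : List Char :=
  if l.length = 0 then []
  else if h1 : l.length = 1 then
    let c := l.headI
    if 97 ≤ c.toNat ∧ c.toNat ≤ 122 then [Char.ofNat (219 - c.toNat)] else [c]
  else
    solutionAltAux (l.take (l.length / 2)) ++ solutionAltAux (l.drop (l.length / 2))
termination_by l.length
decreasing_by
  · simp only [List.length_take]; omega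
  · simp only [List.length_drop]; omega

def solution_alt (x : String) : String := String.mk (solutionAltAux x.toList)

-- ===== PRECONDITION & SPEC =====
def Spec_solution (x : String) (out : String) : Prop := out = solution_alt x
instance (x : String) (out : String) : Decidable (Spec_solution x out) := by unfold Spec_solution; infer_instance

-- ===== CLAIM (what is proved, stated in full; the proofs are below) =====
def Claim_equal_solution : Prop := ∀ (x : String), Dom_solution x → Spec_solution x (solution x)

-- ===== LEMMAS AND PROOFS =====

-- The common per-character mirror map.
def pvMirror (c : Char) : Char :=
  if 97 ≤ c.toNat ∧ c.toNat ≤ 122 then Char.ofNat (122 - (c.toNat - 97)) else c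

-- A's fold is the map of the per-character branch.
theorem solution_foldl (l : List Char) (acc : List Char) :
    l.foldl (fun result c =>
      if 97 ≤ c.toNat ∧ c.toNat ≤ 122 then
        result ++ [Char.ofNat (122 - (c.toNat - 97))]
      else
        result ++ [c]) acc
    = acc ++ l.map pvMirror := by
  induction l generalizing acc with
  | nil => simp
  | cons c l ih =>
      simp only [List.foldl_cons, List.map_cons, ih, pvMirror]
      split_ifs <;> simp

-- B's divide-and-conquer also computes that map.
theorem solutionAltAux_eq_of_le (n : Nat) :
    ∀ l : List Char, l.length ≤ n → solutionAltAux l = l.map pvMirror := by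
  induction n with
  | zero =>
      intro l hl
      have : l = [] := List.eq_nil_of_length_eq_zero (Nat.le_zero.mp hl)
      subst this
      rw [solutionAltAux]; simp
  | succ n ih =>
      intro l hl
      rw [solutionAltAux]
      by_cases h0 : l.length = 0
      · have : l = [] := List.eq_nil_of_length_eq_zero h0
        subst this; simp
      · by_cases h1 : l.length = 1
        · match l, h1 with
          | [c], _ =>
              simp only [if_neg h0, List.headI, List.map, pvMirror]
              split_ifs with hc
              · have : 122 - (c.toNat - 97) = 219 - c.toNat := by omega
                simp [this]
              · rfl
        · rw [if_neg h0, dif_neg h1,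
            ih (l.take (l.length / 2)) (by simp only [List.length_take]; omega),
            ih (l.drop (l.length / 2)) (by simp only [List.length_drop]; omega),
            ← List.map_append, List.take_append_drop]

theorem solutionAltAux_eq (l : List Char) : solutionAltAux l = l.map pvMirror :=
  solutionAltAux_eq_of_le l.length l (Nat.le_refl _)

-- ===== VERDICT (by name: the statement is the Claim_ definition above) =====
theorem solution_spec : Claim_equal_solution := by
  intro x _
  unfold Spec_solution solution solution_alt
  rw [solution_foldl, solutionAltAux_eq, List.nil_append]
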